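-- pv_equiv track=rewrite | github.com/sathvikbhat/robdd_for_binary_function | ROBDD_implementation.py | get_cubelist
-- ===== SOURCE A (Python) =====
-- def search_cube(s,ch):
--     for i in range(len(s)):
--         if s[i] == ch and s[i+1]!="'":
--             return 1
--         elif s[i]==ch and s[i+1]=="'":
--             return 2
--     return 0
--
-- def get_cubelist(n,s):
--     alpha = []
--     for i in range(n):
--         alpha.append(chr(97+i))
--     arr = []
--     for i in range(len(s)):
--         cube = s[i] + ' '
--         pcn = []
--         for j in range(n):
--             pcn.append(search_cube(cube, alpha[j]))
--         arr.append(pcn)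
--     return arr
-- ===== SOURCE B (Python) =====
-- def get_cubelist(n, s):
--     arr = []
--     for cube in s:
--         status = [0] * n
--         for ch, nxt in zip(cube, cube[1:] + ' '):
--             idx = ord(ch) - 97
--             if 0 <= idx < n and status[idx] == 0:
--                 status[idx] = 2 if nxt == "'" else 1
--         arr.append(status)
--     return arr
-- ===== Notes on version B (the rewrite author's own statement) =====
-- stated objective: faster
-- what changed: Instead of building an n-letter alphabet and rescanning each cube string once per letter (nested loops), B makes one forward pass per cube over (char, next-char) pairs, distributing each character into its slot of a preallocated status array; the status[idx]==0 guard preserves first-occurrence semantics.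
import Mathlib
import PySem

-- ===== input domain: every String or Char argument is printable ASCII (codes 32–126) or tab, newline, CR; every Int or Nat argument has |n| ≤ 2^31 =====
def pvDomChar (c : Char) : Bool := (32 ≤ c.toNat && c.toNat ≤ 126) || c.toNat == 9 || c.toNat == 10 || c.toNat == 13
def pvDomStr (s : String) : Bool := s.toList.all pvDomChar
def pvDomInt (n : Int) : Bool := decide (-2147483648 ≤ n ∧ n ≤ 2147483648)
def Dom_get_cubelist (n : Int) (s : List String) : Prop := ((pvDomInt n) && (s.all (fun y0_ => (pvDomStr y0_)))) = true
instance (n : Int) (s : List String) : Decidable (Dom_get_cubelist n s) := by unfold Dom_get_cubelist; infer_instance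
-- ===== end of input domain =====

-- B replaces A's per-letter rescans of each cube by one forward pass distributing each
-- character into its slot of a status array (return value only; no mutation is observable).

-- ===== PORT A =====
-- search_cube: Python's index loop 'for i in range(len(s))'.  s[i+1] is ported as
-- 'getD (i+1) '' '' ': Python would raise IndexError there only when s's LAST char equals ch,
-- which is unreachable from get_cubelist (the last char is the appended ' ', and every ch
-- passed in has code ≥ 97 or is chr's out-of-range fallback); on all calls made the default
-- is never the decisive value, so the port is exact.
def search_cube_go (s : List Char) (ch : Char) (i : Nat) : Int :=
  if h : i < s.length then
    if s[i] = ch ∧ s.getD (i + 1) ' ' ≠ '\'' then 1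
    else if s[i] = ch ∧ s.getD (i + 1) ' ' = '\'' then 2
    else search_cube_go s ch (i + 1)
  else 0
termination_by s.length - i

def search_cube (s : List Char) (ch : Char) : Int := search_cube_go s ch 0

-- alpha[j] indexed over j in range(n) is the traversal of alpha itself (len(alpha) = n)
def get_cubelist (n : Int) (s : List String) : List (List Int) :=
  let alpha := (PySem.List.pyRange 0 n 1).map (fun i => Char.ofNat (97 + i).toNat)
  s.map (fun si =>
    let cube := si.toList ++ [' ']
    alpha.map (fun a => search_cube cube a))

-- ===== PORT B =====
-- one pass over zip(cube, cube[1:] + ' '); status[idx] read/write only happens under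
-- the 0 ≤ idx < n guard, where getD/set are exact
def pass_b (n : Int) (st : List Int) : List (Char × Char) → List Int
  | [] => st
  | (ch, nxt) :: rest =>
    let idx : Int := (ch.toNat : Int) - 97
    pass_b n
      (if 0 ≤ idx ∧ idx < n ∧ st.getD idx.toNat 0 = 0
       then st.set idx.toNat (if nxt = '\'' then 2 else 1) else st) rest

def get_cubelist_alt (n : Int) (s : List String) : List (List Int) :=
  s.map (fun cube =>
    let cs := cube.toList
    pass_b n (List.replicate n.toNat 0) (cs.zip (cs.drop 1 ++ [' '])))

-- ===== PRECONDITION & SPEC =====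
-- Pre_ excludes exactly n ≥ 1114016, where Python A raises ValueError: chr(97+i) is called
-- for every i < n and chr rejects codes ≥ 0x110000 (= 1114112, so it raises from i = 1114015 on).
def Pre_get_cubelist (n : Int) (s : List String) : Prop := n ≤ 1114015
instance (n : Int) (s : List String) : Decidable (Pre_get_cubelist n s) := by unfold Pre_get_cubelist; infer_instance

def pvWitness_get_cubelist : Int × List String := (3, ["ab'c"])

def Spec_get_cubelist (n : Int) (s : List String) (out : List (List Int)) : Prop := out = get_cubelist_alt n s
instance (n : Int) (s : List String) (out : List (List Int)) : Decidable (Spec_get_cubelist n s out) := by unfold Spec_get_cubelist; infer_instance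

-- ===== CLAIM (what is proved, stated in full; the proofs are below) =====
def Claim_equal_get_cubelist : Prop := ∀ (n : Int) (s : List String), Dom_get_cubelist n s → Pre_get_cubelist n s → Spec_get_cubelist n s (get_cubelist n s)

-- ===== LEMMAS AND PROOFS =====

-- structural reading of A's index loop
def sstruct (ch : Char) : List Char → Int
  | [] => 0
  | x :: rest =>
    if x = ch ∧ rest.headD ' ' ≠ '\'' then 1
    else if x = ch ∧ rest.headD ' ' = '\'' then 2
    else sstruct ch rest

-- first-occurrence status over (char, lookahead) pairs
def fstat (ch : Char) : List (Char × Char) → Int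
  | [] => 0
  | (c, nxt) :: rest => if c = ch then (if nxt = '\'' then 2 else 1) else fstat ch rest

-- same, keyed by the letter's index instead of the Char
def fstatB (j : Nat) : List (Char × Char) → Int
  | [] => 0
  | (c, nxt) :: rest => if c.toNat = 97 + j then (if nxt = '\'' then 2 else 1) else fstatB j rest

lemma getD_succ_eq (s : List Char) (i : Nat) :
    s.getD (i + 1) ' ' = (s.drop (i + 1)).headD ' ' := by
  simp [List.getD_eq_getElem?_getD, List.headD_eq_head?_getD, List.head?_drop]

lemma go_eq_sstruct (s : List Char) (ch : Char) : ∀ i,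
    search_cube_go s ch i = sstruct ch (s.drop i) := by
  suffices H : ∀ k i, s.length - i ≤ k → search_cube_go s ch i = sstruct ch (s.drop i) from
    fun i => H (s.length - i) i le_rfl
  intro k
  induction k with
  | zero =>
    intro i hi
    have h : ¬ i < s.length := by omega
    rw [search_cube_go]
    simp [h, List.drop_eq_nil_of_le (by omega : s.length ≤ i), sstruct]
  | succ k ih =>
    intro i hi
    rw [search_cube_go]
    by_cases h : i < s.length
    · rw [List.drop_eq_getElem_cons h]
      simp only [h, dif_pos, sstruct, getD_succ_eq]
      split_ifs <;> first | rfl | exact ih (i + 1) (by omega)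
    · simp [h, List.drop_eq_nil_of_le (by omega : s.length ≤ i), sstruct]

lemma sstruct_eq_fstat (ch : Char) (h : ch ≠ ' ') :
    ∀ t : List Char, sstruct ch (t ++ [' ']) = fstat ch (t.zip (t.drop 1 ++ [' '])) := by
  intro t
  induction t with
  | nil => simp [sstruct, fstat, Ne.symm h]
  | cons x t' ih =>
    cases t' with
    | nil => by_cases hx : x = ch <;> simp [sstruct, fstat, hx, Ne.symm h]
    | cons y t'' =>
      by_cases hx : x = ch <;> by_cases hy : y = '\'' <;>
        simp_all [sstruct, fstat]

lemma pass_b_length (n : Int) (ps : List (Char × Char)) : ∀ st : List Int,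
    (pass_b n st ps).length = st.length := by
  induction ps with
  | nil => intro st; rfl
  | cons p rest ih =>
    intro st
    obtain ⟨c, nxt⟩ := p
    simp only [pass_b]
    rw [ih]
    split <;> simp

lemma toNat_ofNat_valid (m : Nat) (hv : m.isValidChar) : (Char.ofNat m).toNat = m := by
  have hlt : m < 4294967296 := by
    rcases hv with h | ⟨h1, h2⟩ <;> omega
  simp [Char.ofNat, hv, Char.ofNatAux, Char.toNat]

lemma toNat_ofNat_invalid (m : Nat) (hm : ¬ m.isValidChar) : (Char.ofNat m).toNat = 0 := by
  simp [Char.ofNat, hm, Char.toNat]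

lemma char_eq_ofNat_iff (c : Char) (m : Nat) (h0 : 0 < c.toNat) (h126 : c.toNat ≤ 126) :
    c = Char.ofNat m ↔ c.toNat = m := by
  constructor
  · intro h
    by_cases hv : m.isValidChar
    · rw [h, toNat_ofNat_valid m hv]
    · rw [h, toNat_ofNat_invalid m hv] at h0
      omega
  · intro h
    have hv : m.isValidChar := Or.inl (by omega)
    have : (Char.ofNat m).toNat = c.toNat := by rw [toNat_ofNat_valid m hv, h]
    exact Char.ext (by
      apply UInt32.toNat_inj.mp
      exact this.symm)

lemma ofNat_ne_space (m : Nat) (hm : 97 ≤ m) : Char.ofNat m ≠ ' ' := by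
  intro h
  have h32 : (Char.ofNat m).toNat = 32 := by rw [h]; rfl
  by_cases hv : m.isValidChar
  · rw [toNat_ofNat_valid m hv] at h32; omega
  · rw [toNat_ofNat_invalid m hv] at h32; omega

lemma fstatB_eq_fstat (j : Nat) (ps : List (Char × Char))
    (hdom : ∀ p ∈ ps, pvDomChar p.1 = true) :
    fstatB j ps = fstat (Char.ofNat (97 + j)) ps := by
  induction ps with
  | nil => rfl
  | cons p rest ih =>
    obtain ⟨c, nxt⟩ := p
    have hdc : pvDomChar c = true := hdom (c, nxt) (by simp)
    have hc0 : 0 < c.toNat ∧ c.toNat ≤ 126 := by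
      simp [pvDomChar] at hdc
      omega
    have hrest := ih (fun p hp => hdom p (List.mem_cons_of_mem _ hp))
    by_cases hc : c.toNat = 97 + j
    · have hcc : c = Char.ofNat (97 + j) := (char_eq_ofNat_iff c _ hc0.1 hc0.2).mpr hc
      simp [fstatB, fstat, hcc, toNat_ofNat_valid (97 + j) (Or.inl (by omega))]
    · have hcc : c ≠ Char.ofNat (97 + j) := fun hh => hc ((char_eq_ofNat_iff c _ hc0.1 hc0.2).mp hh)
      simp [fstatB, fstat, hc, hcc, hrest]

lemma pass_b_getD (n : Int) (ps : List (Char × Char)) : ∀ (st : List Int) (j : Nat),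
    j < st.length → (j : Int) < n →
    (pass_b n st ps).getD j 0 =
      if st.getD j 0 ≠ 0 then st.getD j 0 else fstatB j ps := by
  induction ps with
  | nil =>
    intro st j hj hjn
    simp only [pass_b, fstatB]
    split <;> simp_all
  | cons p rest ih =>
    intro st j hj hjn
    obtain ⟨c, nxt⟩ := p
    simp only [pass_b]
    by_cases hcond : 0 ≤ (c.toNat : Int) - 97 ∧ (c.toNat : Int) - 97 < n ∧
        st.getD ((c.toNat : Int) - 97).toNat 0 = 0
    · rw [if_pos hcond]
      by_cases heq : ((c.toNat : Int) - 97).toNat = j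
      · have hc : c.toNat = 97 + j := by omega
        have hz : st.getD j 0 = 0 := by rw [← heq]; exact hcond.2.2
        rw [ih _ j (by simpa using hj) hjn]
        have hset : ((st.set ((c.toNat : Int) - 97).toNat
            (if nxt = '\'' then 2 else 1)).getD j 0) = (if nxt = '\'' then (2 : Int) else 1) := by
          rw [heq]
          simp [List.getD_eq_getElem?_getD, hj]
        have hv : (if nxt = '\'' then (2 : Int) else 1) ≠ 0 := by split <;> norm_num
        have hz' : st[j]?.getD 0 = 0 := by simpa [List.getD_eq_getElem?_getD] using hz
        rw [hset]
        simp [hv, hz', fstatB, hc]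
      · have hget : ((st.set ((c.toNat : Int) - 97).toNat
            (if nxt = '\'' then 2 else 1)).getD j 0) = st.getD j 0 := by
          simp [List.getD_eq_getElem?_getD, List.getElem?_set_ne heq]
        rw [ih _ j (by simpa using hj) hjn, hget]
        have hcne : c.toNat ≠ 97 + j := by omega
        simp [fstatB, hcne]
    · rw [if_neg hcond]
      rw [ih st j hj hjn]
      by_cases hz : st.getD j 0 = 0
      · have hcne : c.toNat ≠ 97 + j := by
          intro hcc
          apply hcond
          refine ⟨by omega, by omega, ?_⟩
          have h1 : ((c.toNat : Int) - 97).toNat = j := by omega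
          rw [h1]; exact hz
        simp [fstatB, hcne]
      · have hz' : ¬ st[j]?.getD 0 = 0 := by simpa [List.getD_eq_getElem?_getD] using hz
        simp [hz']

set_option maxRecDepth 10000 in
lemma cube_eq (n : Int) (cs : List Char) (hdom : ∀ c ∈ cs, pvDomChar c = true) :
    ((PySem.List.pyRange 0 n 1).map (fun i => Char.ofNat (97 + i).toNat)).map
        (fun a => search_cube (cs ++ [' ']) a) =
      pass_b n (List.replicate n.toNat 0) (cs.zip (cs.drop 1 ++ [' '])) := by
  apply List.ext_getElem
  · rw [List.length_map, List.length_map, PySem.List.length_pyRange_one, pass_b_length,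
      List.length_replicate]
    omega
  · intro j h1 h2
    rw [List.length_map, List.length_map, PySem.List.length_pyRange_one] at h1
    have hjn : j < n.toNat := by omega
    have hlen1 : j < ((PySem.List.pyRange 0 n 1).map
        (fun i => Char.ofNat (97 + i).toNat)).length := by
      rw [List.length_map, PySem.List.length_pyRange_one]
      omega
    have hlen0 : j < (PySem.List.pyRange 0 n 1).length := by
      rw [PySem.List.length_pyRange_one]
      omega
    have hch : ((PySem.List.pyRange 0 n 1).map
        (fun i => Char.ofNat (97 + i).toNat))[j]'hlen1 = Char.ofNat (97 + j) := by
      rw [List.getElem_map, PySem.List.getElem_pyRange_one]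
      congr 1
      omega
    rw [List.getElem_map, hch]
    have hlen2 : j < (pass_b n (List.replicate n.toNat 0) (cs.zip (cs.drop 1 ++ [' ']))).length := h2
    rw [← List.getD_eq_getElem _ 0 hlen2]
    rw [pass_b_getD n _ _ j (by simp [hjn]) (by omega)]
    have hz : (List.replicate n.toNat (0 : Int)).getD j 0 = 0 := by
      simp [List.getD_eq_getElem?_getD, hjn]
    rw [hz]
    simp only [ne_eq, not_true_eq_false, if_false]
    have hdomz : ∀ p ∈ cs.zip (cs.drop 1 ++ [' ']), pvDomChar p.1 = true := by
      intro p hp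
      obtain ⟨c, d⟩ := p
      exact hdom c (List.of_mem_zip hp).1
    rw [fstatB_eq_fstat j _ hdomz]
    rw [search_cube, go_eq_sstruct, List.drop_zero]
    exact sstruct_eq_fstat _ (ofNat_ne_space _ (by omega)) cs

-- ===== VERDICT (by name: the statement is the Claim_ definition above) =====
theorem get_cubelist_spec : Claim_equal_get_cubelist := by
  intro n s hdom _hpre
  unfold Spec_get_cubelist
  simp only [get_cubelist, get_cubelist_alt]
  apply List.map_congr_left
  intro si hsi
  have hds : pvDomStr si = true := by
    unfold Dom_get_cubelist at hdom
    simp at hdom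
    exact hdom.2 si hsi
  have hdc : ∀ c ∈ si.toList, pvDomChar c = true := by
    simpa [pvDomStr, List.all_eq_true] using hds
  exact cube_eq n si.toList hdc
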